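-- pv_equiv track=rewrite | github.com/Parapluie48/vtsm-para | vtsm_backend/vtsm_backend.py | get_best_matching_sound_to_chunk
-- ===== SOURCE A (Python) =====
-- from collections import Counter
-- import operator
--
-- def get_best_matching_sound_to_chunk(
--         chunk_fingerprints, matching_fingerprints):
--     hashdict = {}
--     for (hashh, offset, sound_id) in matching_fingerprints:
--         if hashh in hashdict:
--             hashdict[hashh].append((offset, sound_id))
--         else:
--             hashdict[hashh] = [(offset, sound_id)]
--     # We created a dictionary with hashes as key and the corresponding offset
--     # and soundtrack id as values
--     # Now, we create a dictionary with offset differences for every hash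
--     # and every soundtrack that matched, where the key is the soundtrack id
--     # and values are the offset differences
--     sounddict = {}
--     for hashh, offset in chunk_fingerprints:
--         if hashh in hashdict:
--             for sound_offset, sound_id in hashdict[hashh]:
--                 if sound_id in sounddict:
--                     sounddict[sound_id].append(sound_offset-offset)
--                 else:
--                     sounddict[sound_id] = [sound_offset-offset]
--     # Now, we compute which sound had the most matches with the same offset
--     # differences (we allow some error)
--     max_occurences, max_sound_id = (-1, -1)
--     for sound_id, occurences in sounddict.items():
--         occurences_dict = dict(Counter(occurences))
--         m_offset_diff, _ = max(
--             occurences_dict.items(),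
--             key=operator.itemgetter(1))
--
--         error_tolerant_counter = 0
--         for offset_diff, occurence_val in occurences_dict.items():
--             if (
--                     m_offset_diff - 3 <= offset_diff
--                     and offset_diff <= m_offset_diff+3):
--                 error_tolerant_counter += occurence_val
--
--         if max_occurences < error_tolerant_counter:
--             max_occurences = error_tolerant_counter
--             max_sound_id = sound_id
--     if max_occurences >= 10:
--         return max_sound_id
--     else:
--         return -1
-- ===== SOURCE B (Python) =====
-- from collections import Counter
--
--
-- def _score(diffs):
--     counts = Counter(diffs)
--     mode = max(counts, key=counts.get)
--     return sum(v for d, v in counts.items() if mode - 3 <= d <= mode + 3)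
--
--
-- def get_best_matching_sound_to_chunk(
--         chunk_fingerprints, matching_fingerprints):
--     # One nested scan, no inverted hash index: group offset differences
--     # directly by sound id, in the same encounter order.
--     sounddict = {}
--     for hashh, offset in chunk_fingerprints:
--         for h, sound_offset, sound_id in matching_fingerprints:
--             if h == hashh:
--                 sounddict.setdefault(sound_id, []).append(sound_offset - offset)
--     best_score, best_id = -1, -1
--     for sound_id, diffs in sounddict.items():
--         score = _score(diffs)
--         if best_score < score:
--             best_score, best_id = score, sound_id
--     return best_id if best_score >= 10 else -1
-- ===== Notes on version B (the rewrite author's own statement) =====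
-- stated objective: simpler
-- what changed: B drops A's inverted hash index entirely, grouping offset differences by sound id with one direct nested scan in the same encounter order, and factors the per-sound scoring (mode plus +/-3 window) into a small helper using max(counts, key=counts.get) and a sum over a comprehension instead of an items-max and an accumulator loop.
import Mathlib
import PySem

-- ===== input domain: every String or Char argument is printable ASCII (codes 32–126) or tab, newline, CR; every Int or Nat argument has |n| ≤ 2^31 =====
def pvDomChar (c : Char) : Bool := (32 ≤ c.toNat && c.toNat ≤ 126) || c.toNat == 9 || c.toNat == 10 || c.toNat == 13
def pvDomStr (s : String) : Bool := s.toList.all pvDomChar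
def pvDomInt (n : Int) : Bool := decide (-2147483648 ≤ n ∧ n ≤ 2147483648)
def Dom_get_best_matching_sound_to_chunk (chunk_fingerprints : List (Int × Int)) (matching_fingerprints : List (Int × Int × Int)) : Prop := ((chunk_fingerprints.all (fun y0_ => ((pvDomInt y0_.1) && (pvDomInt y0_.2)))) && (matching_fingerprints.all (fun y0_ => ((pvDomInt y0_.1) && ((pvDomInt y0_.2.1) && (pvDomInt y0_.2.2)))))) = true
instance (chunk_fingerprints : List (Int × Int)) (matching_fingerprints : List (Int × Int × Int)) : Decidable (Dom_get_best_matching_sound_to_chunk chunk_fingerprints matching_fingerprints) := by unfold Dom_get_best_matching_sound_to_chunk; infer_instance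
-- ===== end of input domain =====

-- B drops A's inverted hash index and groups offset differences by sound id with one
-- nested scan; objective: simpler (shorter, one dictionary instead of two).

-- ===== PORT A =====
-- A's first loop: build hashdict (hash -> list of (offset, sound_id)).
def pvHashdict (matching_fingerprints : List (Int × Int × Int)) : PySem.Dict Int (List (Int × Int)) :=
  matching_fingerprints.foldl (fun hd t =>
    if hd.contains t.1 then hd.modify t.1 [] (fun l => l ++ [(t.2.1, t.2.2)])
    else hd.insert t.1 [(t.2.1, t.2.2)]) PySem.Dict.empty

def get_best_matching_sound_to_chunk (chunk_fingerprints : List (Int × Int)) (matching_fingerprints : List (Int × Int × Int)) : Int :=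
  let hashdict := pvHashdict matching_fingerprints
  let sounddict : PySem.Dict Int (List Int) :=
    chunk_fingerprints.foldl (fun sd p =>
      if hashdict.contains p.1 then
        (hashdict.getD p.1 []).foldl (fun sd q =>
          if sd.contains q.2 then sd.modify q.2 [] (fun l => l ++ [q.1 - p.2])
          else sd.insert q.2 [q.1 - p.2]) sd
      else sd) PySem.Dict.empty
  let res : Int × Int :=
    sounddict.items.foldl (fun acc it =>
      let occurences_dict := PySem.Dict.counter it.2
      -- Python's max(...) would raise on an empty dict; occurences is never empty here,
      -- so the .getD (0, 0) default is unreachable.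
      let m_offset_diff := ((PySem.List.max? occurences_dict.items (fun p => p.2)).getD (0, 0)).1
      let error_tolerant_counter := occurences_dict.items.foldl (fun c p =>
        if m_offset_diff - 3 ≤ p.1 ∧ p.1 ≤ m_offset_diff + 3 then c + p.2 else c) 0
      if acc.1 < error_tolerant_counter then (error_tolerant_counter, it.1) else acc) (-1, -1)
  if res.1 ≥ 10 then res.2 else -1

-- ===== PORT B =====
-- _score from Source B.  (max(counts, key=counts.get) would raise on an empty counter;
-- diffs is never empty here, so the .getD 0 default is unreachable.)
def pvScore (diffs : List Int) : Int :=
  let counts := PySem.Dict.counter diffs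
  let mode := (PySem.List.max? counts.keys (fun k => counts.getD k 0)).getD 0
  ((counts.items.filter (fun p => decide (mode - 3 ≤ p.1) && decide (p.1 ≤ mode + 3))).map (fun p => p.2)).sum

def get_best_matching_sound_to_chunk_alt (chunk_fingerprints : List (Int × Int)) (matching_fingerprints : List (Int × Int × Int)) : Int :=
  -- sounddict.setdefault(sound_id, []).append(x) is exactly Dict.modify sound_id [] (· ++ [x])
  let sounddict : PySem.Dict Int (List Int) :=
    chunk_fingerprints.foldl (fun sd p =>
      matching_fingerprints.foldl (fun sd t =>
        if t.1 == p.1 then sd.modify t.2.2 [] (fun l => l ++ [t.2.1 - p.2]) else sd) sd)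
      PySem.Dict.empty
  let res : Int × Int :=
    sounddict.items.foldl (fun acc it =>
      let score := pvScore it.2
      if acc.1 < score then (score, it.1) else acc) (-1, -1)
  if res.1 ≥ 10 then res.2 else -1

-- ===== PRECONDITION & SPEC =====
def Spec_get_best_matching_sound_to_chunk (chunk_fingerprints : List (Int × Int)) (matching_fingerprints : List (Int × Int × Int)) (out : Int) : Prop := out = get_best_matching_sound_to_chunk_alt chunk_fingerprints matching_fingerprints
instance (chunk_fingerprints : List (Int × Int)) (matching_fingerprints : List (Int × Int × Int)) (out : Int) : Decidable (Spec_get_best_matching_sound_to_chunk chunk_fingerprints matching_fingerprints out) := by unfold Spec_get_best_matching_sound_to_chunk; infer_instance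

-- ===== CLAIM (what is proved, stated in full; the proofs are below) =====
def Claim_equal_get_best_matching_sound_to_chunk : Prop := ∀ (chunk_fingerprints : List (Int × Int)) (matching_fingerprints : List (Int × Int × Int)), Dom_get_best_matching_sound_to_chunk chunk_fingerprints matching_fingerprints → Spec_get_best_matching_sound_to_chunk chunk_fingerprints matching_fingerprints (get_best_matching_sound_to_chunk chunk_fingerprints matching_fingerprints)

-- ===== LEMMAS AND PROOFS =====

-- 'if contains then append else start a singleton' IS one Dict.modify
theorem pv_if_modify {ν : Type} (d : PySem.Dict Int (List ν)) (k : Int) (x : ν) :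
    (if d.contains k then d.modify k [] (fun l => l ++ [x]) else d.insert k [x])
      = d.modify k [] (fun l => l ++ [x]) := by
  by_cases h : d.contains k = true
  · simp [h]
  · simp only [Bool.not_eq_true] at h
    simp [h, PySem.Dict.modify, PySem.Dict.getD_of_not_contains d [] h]

theorem pvHashdict_eq (mf : List (Int × Int × Int)) :
    pvHashdict mf = (mf.map (fun t => (t.1, (t.2.1, t.2.2)))).foldl
      (fun d p => d.modify p.1 [] (fun l => l ++ [p.2])) PySem.Dict.empty := by
  unfold pvHashdict
  rw [List.foldl_map]
  exact PySem.List.foldl_congr_mem _ _ _ _ (fun d t _ => pv_if_modify d t.1 (t.2.1, t.2.2))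

theorem pvHashdict_getD (mf : List (Int × Int × Int)) (h : Int) :
    (pvHashdict mf).getD h [] = (mf.filter (fun t => t.1 == h)).map (fun t => (t.2.1, t.2.2)) := by
  rw [pvHashdict_eq, PySem.Dict.getD_foldl_modify_append]
  simp

theorem pvHashdict_not_contains (mf : List (Int × Int × Int)) (h : Int)
    (hc : (pvHashdict mf).contains h = false) : mf.filter (fun t => t.1 == h) = [] := by
  have hg := pvHashdict_getD mf h
  rw [PySem.Dict.getD_of_not_contains _ _ hc] at hg
  exact List.map_eq_nil_iff.mp hg.symm

-- the two sounddict-building steps agree for every chunk fingerprint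
theorem pv_sd_step_eq (mf : List (Int × Int × Int)) (sd : PySem.Dict Int (List Int)) (p : Int × Int) :
    (if (pvHashdict mf).contains p.1 then
        ((pvHashdict mf).getD p.1 []).foldl (fun sd q =>
          if sd.contains q.2 then sd.modify q.2 [] (fun l => l ++ [q.1 - p.2])
          else sd.insert q.2 [q.1 - p.2]) sd
      else sd)
    = mf.foldl (fun sd t =>
        if t.1 == p.1 then sd.modify t.2.2 [] (fun l => l ++ [t.2.1 - p.2]) else sd) sd := by
  have hfold : mf.foldl (fun sd t =>
        if t.1 == p.1 then sd.modify t.2.2 [] (fun l => l ++ [t.2.1 - p.2]) else sd) sd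
      = (mf.filter (fun t => t.1 == p.1)).foldl
          (fun sd t => sd.modify t.2.2 [] (fun l => l ++ [t.2.1 - p.2])) sd :=
    (List.foldl_filter).symm
  rw [hfold]
  by_cases hc : (pvHashdict mf).contains p.1 = true
  · simp only [hc, if_true]
    rw [pvHashdict_getD, List.foldl_map]
    exact PySem.List.foldl_congr_mem _ _ _ _
      (fun sd q _ => pv_if_modify sd q.2.2 (q.2.1 - p.2))
  · simp only [Bool.not_eq_true] at hc
    rw [pvHashdict_not_contains mf p.1 hc]
    simp [hc]

-- max? commutes with map
theorem pv_max?_map {α β κ : Type} [LinearOrder κ] (f : α → β) (key : β → κ) (l : List α) :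
    PySem.List.max? (l.map f) key = (PySem.List.max? l (fun x => key (f x))).map f := by
  unfold PySem.List.max?
  rw [List.foldl_map]
  suffices h : ∀ (o : Option α),
      (l.foldl (fun acc x =>
        match acc with
        | none => some (f x)
        | some m => if key m < key (f x) then some (f x) else some m) (o.map f))
      = (l.foldl (fun acc x =>
          match acc with
          | none => some x
          | some m => if (fun y => key (f y)) m < (fun y => key (f y)) x then some x else some m) o).map f by
    exact h none
  intro o
  induction l generalizing o with
  | nil => rfl
  | cons x t ih =>
    simp only [List.foldl_cons]
    have hstep : (match o.map f with
        | none => some (f x)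
        | some m => if key m < key (f x) then some (f x) else some m)
        = Option.map f (match o with
          | none => some x
          | some m => if (fun y => key (f y)) m < (fun y => key (f y)) x then some x else some m) := by
      cases o with
      | none => rfl
      | some m => simp only [Option.map_some]; split_ifs <;> rfl
    rw [hstep, ih]

-- A's error-tolerant counting loop is a filtered sum
theorem pv_etc_eq (m : Int) (l : List (Int × Int)) (a : Int) :
    l.foldl (fun c p => if m - 3 ≤ p.1 ∧ p.1 ≤ m + 3 then c + p.2 else c) a
      = a + ((l.filter (fun p => decide (m - 3 ≤ p.1) && decide (p.1 ≤ m + 3))).map (fun p => p.2)).sum := by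
  induction l generalizing a with
  | nil => simp
  | cons x t ih =>
    rw [List.foldl_cons, List.filter_cons, ih]
    by_cases hx : m - 3 ≤ x.1 ∧ x.1 ≤ m + 3
    · have hb : (decide (m - 3 ≤ x.1) && decide (x.1 ≤ m + 3)) = true := by
        simp [hx.1, hx.2]
      rw [if_pos hx, hb]
      simp only [if_true, List.map_cons, List.sum_cons]
      ring
    · have hb : (decide (m - 3 ≤ x.1) && decide (x.1 ≤ m + 3)) = false := by
        rw [Bool.and_eq_false_iff]
        simp only [decide_eq_false_iff_not]
        omega
      rw [if_neg hx, hb]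
      simp

-- A's per-sound scoring equals pvScore
theorem pv_score_eq (occ : List Int) :
    (PySem.Dict.counter occ).items.foldl (fun c p =>
        if ((PySem.List.max? (PySem.Dict.counter occ).items (fun p => p.2)).getD (0, 0)).1 - 3 ≤ p.1
           ∧ p.1 ≤ ((PySem.List.max? (PySem.Dict.counter occ).items (fun p => p.2)).getD (0, 0)).1 + 3
        then c + p.2 else c) 0
      = pvScore occ := by
  have hitems := PySem.Dict.items_eq_map_keys (PySem.Dict.counter occ)
    (PySem.Dict.nodup_keys_counter occ) 0
  have hm : ((PySem.List.max? (PySem.Dict.counter occ).items (fun p => p.2)).getD (0, 0)).1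
      = (PySem.List.max? (PySem.Dict.counter occ).keys
          (fun k => (PySem.Dict.counter occ).getD k 0)).getD 0 := by
    rw [hitems, pv_max?_map]
    cases PySem.List.max? (PySem.Dict.counter occ).keys
      (fun k => (PySem.Dict.counter occ).getD k 0) <;> rfl
  simp only [pvScore]
  rw [hm, pv_etc_eq]
  simp

-- ===== VERDICT (by name: the statement is the Claim_ definition above) =====
theorem get_best_matching_sound_to_chunk_spec : Claim_equal_get_best_matching_sound_to_chunk := by
  intro cf mf _
  unfold Spec_get_best_matching_sound_to_chunk
  unfold get_best_matching_sound_to_chunk get_best_matching_sound_to_chunk_alt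
  simp only []
  have hsd : cf.foldl (fun sd p =>
      if (pvHashdict mf).contains p.1 then
        ((pvHashdict mf).getD p.1 []).foldl (fun sd q =>
          if sd.contains q.2 then sd.modify q.2 [] (fun l => l ++ [q.1 - p.2])
          else sd.insert q.2 [q.1 - p.2]) sd
      else sd) PySem.Dict.empty
      = cf.foldl (fun sd p =>
          mf.foldl (fun sd t =>
            if t.1 == p.1 then sd.modify t.2.2 [] (fun l => l ++ [t.2.1 - p.2]) else sd) sd)
          PySem.Dict.empty :=
    PySem.List.foldl_congr_mem _ _ _ _ (fun sd p _ => pv_sd_step_eq mf sd p)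
  rw [hsd]
  have hsel : ∀ (items : List (Int × List Int)),
      items.foldl (fun acc it =>
        let occurences_dict := PySem.Dict.counter it.2
        let m_offset_diff := ((PySem.List.max? occurences_dict.items (fun p => p.2)).getD (0, 0)).1
        let error_tolerant_counter : Int := occurences_dict.items.foldl (fun c p =>
          if m_offset_diff - 3 ≤ p.1 ∧ p.1 ≤ m_offset_diff + 3 then c + p.2 else c) 0
        if acc.1 < error_tolerant_counter then (error_tolerant_counter, it.1) else acc) ((-1 : Int), (-1 : Int))
      = items.foldl (fun acc it =>
          let score := pvScore it.2
          if acc.1 < score then (score, it.1) else acc) ((-1 : Int), (-1 : Int)) := by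
    intro items
    refine PySem.List.foldl_congr_mem _ _ _ _ (fun acc it _ => ?_)
    show (if acc.1 < (PySem.Dict.counter it.2).items.foldl (fun c p =>
            if ((PySem.List.max? (PySem.Dict.counter it.2).items (fun p => p.2)).getD (0, 0)).1 - 3 ≤ p.1
               ∧ p.1 ≤ ((PySem.List.max? (PySem.Dict.counter it.2).items (fun p => p.2)).getD (0, 0)).1 + 3
            then c + p.2 else c) 0
          then ((PySem.Dict.counter it.2).items.foldl (fun c p =>
            if ((PySem.List.max? (PySem.Dict.counter it.2).items (fun p => p.2)).getD (0, 0)).1 - 3 ≤ p.1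
               ∧ p.1 ≤ ((PySem.List.max? (PySem.Dict.counter it.2).items (fun p => p.2)).getD (0, 0)).1 + 3
            then c + p.2 else c) 0, it.1) else acc)
        = (if acc.1 < pvScore it.2 then (pvScore it.2, it.1) else acc)
    rw [pv_score_eq it.2]
  rw [hsel]
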